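-- pv_equiv track=rewrite | github.com/aarithi123/COP4533_Programming_Assignment_2 | src/cache_eviction_policy.py | count_misses_lru
-- ===== SOURCE A (Python) =====
-- from collections import deque, defaultdict, OrderedDict
--
-- def count_misses_lru(k, requests):
--     cache = OrderedDict()
--     misses = 0
--
--     for item in requests:
--         if item in cache:
--             # hit: move to most recent (right end)
--             cache.move_to_end(item)
--         else:
--             # miss
--             misses += 1
--
--             if len(cache) == k:
--                 # remove least recent (left end)
--                 cache.popitem(last=False)
--
--             # insert as most recent
--             cache[item] = True
--
--     return misses
-- ===== SOURCE B (Python) =====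
-- def count_misses_lru(k, requests):
--     # Offline "stack distance" characterization of LRU: a request is a miss iff the
--     # item was never requested before, or at least k distinct items were requested
--     # since its previous request (for non-negative k; a negative k never evicts).
--     misses = 0
--     for i, item in enumerate(requests):
--         window = requests[:i]
--         if item not in window:
--             misses += 1
--         else:
--             j = (len(window) - 1) - window[::-1].index(item)
--             if 0 <= k <= len(set(window[j + 1:])):
--                 misses += 1
--     return misses
-- ===== Notes on version B (the rewrite author's own statement) =====
-- stated objective: alternative
-- what changed: Replaces the stateful OrderedDict cache simulation by the offline stack-distance characterization of LRU: each request is classified as a miss on its own, by checking whether at least k distinct items were requested since its previous occurrence (never a miss-by-eviction state to maintain).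
-- outside the precondition, e.g. on count_misses_lru(0, [5, 5]): A raises KeyError, B returns 2
-- crash fix: On k = 0 with a nonempty request list A raises KeyError (popitem on an empty OrderedDict); B returns the natural capacity-0 answer: every request is a miss. — e.g. on count_misses_lru(0, [5, 5]): A raises KeyError, B returns 2
import Mathlib
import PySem

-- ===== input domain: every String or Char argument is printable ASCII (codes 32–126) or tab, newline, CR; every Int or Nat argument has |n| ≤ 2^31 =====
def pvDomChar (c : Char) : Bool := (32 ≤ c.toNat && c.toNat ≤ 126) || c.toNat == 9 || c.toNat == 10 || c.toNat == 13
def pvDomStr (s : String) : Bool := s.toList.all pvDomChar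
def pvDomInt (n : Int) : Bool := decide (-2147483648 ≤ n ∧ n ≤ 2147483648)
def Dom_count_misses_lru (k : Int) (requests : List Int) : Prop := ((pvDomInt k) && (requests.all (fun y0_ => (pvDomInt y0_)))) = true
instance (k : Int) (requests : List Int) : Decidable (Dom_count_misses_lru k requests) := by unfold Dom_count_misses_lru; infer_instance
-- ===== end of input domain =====

-- B re-implements the LRU miss count by the offline stack-distance characterization
-- (a request misses iff at least k distinct items were requested since its previous
-- occurrence) instead of simulating the cache; alternative algorithm, not faster.

-- ===== PORT A =====
def count_misses_lru (k : Int) (requests : List Int) : Int :=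
  (requests.foldl
    (fun (st : PySem.Dict Int Bool × Int) item =>
      if st.1.contains item then
        -- cache.move_to_end(item): delete the entry and re-append it at the right end
        ((st.1.erase item).insert item true, st.2)
      else
        let misses := st.2 + 1
        -- cache.popitem(last=False): drop the leftmost entry; on an empty dict Python
        -- raises KeyError (k = 0 with a nonempty request list) — excluded by Pre_
        let cache := if ((st.1.size : Int) == k) then PySem.Dict.mk (st.1.items.drop 1) else st.1
        (cache.insert item true, misses))
    (PySem.Dict.empty, 0)).2

-- ===== PORT B =====
def count_misses_lru_alt (k : Int) (requests : List Int) : Int :=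
  (PySem.List.enumerate requests).foldl
    (fun misses p =>
      let item := p.2
      let window := PySem.List.slice requests none (some p.1)   -- requests[:i]
      if ¬ window.contains item then
        misses + 1
      else
        -- window[::-1].index(item): item ∈ window, so the ValueError branch is unreachable
        let j : Int := ((window.length : Int) - 1) -
          ((PySem.List.index? ((PySem.List.slice? window none none (-1)).getD []) item).getD 0 : Nat)
        if 0 ≤ k ∧ k ≤ ((PySem.Set.ofList (PySem.List.slice window (some (j + 1)) none)).length : Int)
        then misses + 1 else misses)
    0

-- ===== PRECONDITION & SPEC =====
-- Pre_ excludes exactly the inputs where A raises: k = 0 with a nonempty request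
-- list makes A call popitem on an empty OrderedDict (KeyError).
def Pre_count_misses_lru (k : Int) (requests : List Int) : Prop := k ≠ 0 ∨ requests = []
instance (k : Int) (requests : List Int) : Decidable (Pre_count_misses_lru k requests) := by unfold Pre_count_misses_lru; infer_instance
def pvWitness_count_misses_lru : Int × List Int := (2, [1, 2, 3, 1, 4, 2])

-- On k = 0 with nonempty requests A raises KeyError (popitem on an empty cache),
-- while B returns the natural answer for a capacity-0 cache: every request misses.
def Raises_count_misses_lru (k : Int) (requests : List Int) : Prop := k = 0 ∧ requests ≠ []
instance (k : Int) (requests : List Int) : Decidable (Raises_count_misses_lru k requests) := by unfold Raises_count_misses_lru; infer_instance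
def pvRaiseWitness_count_misses_lru : Int × List Int := (0, [5, 5])
def pvRaiseWitnessOut_count_misses_lru : Int := 2

def Spec_count_misses_lru (k : Int) (requests : List Int) (out : Int) : Prop := out = count_misses_lru_alt k requests
instance (k : Int) (requests : List Int) (out : Int) : Decidable (Spec_count_misses_lru k requests out) := by unfold Spec_count_misses_lru; infer_instance

-- ===== CLAIM (what is proved, stated in full; the proofs are below) =====
def Claim_equal_count_misses_lru : Prop := ∀ (k : Int) (requests : List Int), Dom_count_misses_lru k requests → Pre_count_misses_lru k requests → Spec_count_misses_lru k requests (count_misses_lru k requests)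
def Claim_raises_count_misses_lru : Prop := (∀ (k : Int) (requests : List Int), Dom_count_misses_lru k requests → Raises_count_misses_lru k requests → ¬ Pre_count_misses_lru k requests) ∧ (Dom_count_misses_lru (pvRaiseWitness_count_misses_lru.1) (pvRaiseWitness_count_misses_lru.2) ∧ Raises_count_misses_lru (pvRaiseWitness_count_misses_lru.1) (pvRaiseWitness_count_misses_lru.2) ∧ count_misses_lru_alt (pvRaiseWitness_count_misses_lru.1) (pvRaiseWitness_count_misses_lru.2) = pvRaiseWitnessOut_count_misses_lru)

-- ===== LEMMAS AND PROOFS =====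

-- recency list of a prefix: the distinct items seen so far, least recently used first
def recL (p : List Int) : List Int := p.foldl (fun acc x => acc.erase x ++ [x]) []
-- the items A's cache holds after that prefix: the last (at most) k of the recency list
def keepL (k : Int) (l : List Int) : List Int := if 0 ≤ k then l.drop (l.length - k.toNat) else l
-- the cache as a Dict, every value True
def dictOf (l : List Int) : PySem.Dict Int Bool := PySem.Dict.mk (l.map (fun y => (y, true)))
-- the miss indicator
def missB (k : Int) (p : List Int) (x : Int) : Int := if x ∈ keepL k (recL p) then 0 else 1

-- named copies of the two fold bodies (identical terms, for readable lemmas)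
def aStep (k : Int) (st : PySem.Dict Int Bool × Int) (item : Int) : PySem.Dict Int Bool × Int :=
  if st.1.contains item then
    ((st.1.erase item).insert item true, st.2)
  else
    ((if ((st.1.size : Int) == k) then PySem.Dict.mk (st.1.items.drop 1) else st.1).insert item true,
     st.2 + 1)

def bStep (k : Int) (requests : List Int) (misses : Int) (p : Int × Int) : Int :=
  if ¬ (PySem.List.slice requests none (some p.1)).contains p.2 then
    misses + 1
  else
    if 0 ≤ k ∧ k ≤ ((PySem.Set.ofList (PySem.List.slice (PySem.List.slice requests none (some p.1))
        (some ((((PySem.List.slice requests none (some p.1)).length : Int) - 1 -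
          ((PySem.List.index? ((PySem.List.slice? (PySem.List.slice requests none (some p.1)) none none (-1)).getD [])
            p.2).getD 0 : Nat)) + 1)) none)).length : Int)
    then misses + 1 else misses

theorem count_eq_fold (k : Int) (requests : List Int) :
    count_misses_lru k requests = (requests.foldl (aStep k) (PySem.Dict.empty, 0)).2 := rfl

theorem alt_eq_fold (k : Int) (requests : List Int) :
    count_misses_lru_alt k requests = (PySem.List.enumerate requests).foldl (bStep k requests) 0 := rfl

theorem recL_append (p : List Int) (x : Int) :
    recL (p ++ [x]) = (recL p).erase x ++ [x] := by
  simp [recL, List.foldl_append]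

theorem mem_recL (p : List Int) (z : Int) : z ∈ recL p ↔ z ∈ p := by
  induction p using List.reverseRecOn with
  | nil => simp [recL]
  | append_singleton p y ih =>
    rw [recL_append]
    by_cases hzy : z = y
    · subst hzy; simp
    · simp [List.mem_erase_of_ne hzy, ih, hzy]

theorem nodup_recL (p : List Int) : (recL p).Nodup := by
  induction p using List.reverseRecOn with
  | nil => simp [recL]
  | append_singleton p y ih =>
    rw [recL_append]
    have h1 : ((recL p).erase y).Nodup := ih.erase y
    have h2 : y ∉ (recL p).erase y := fun h => by
      have := (ih.mem_erase_iff).1 h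
      exact this.1 rfl
    rw [List.nodup_append]
    refine ⟨h1, List.nodup_singleton y, ?_⟩
    intro a ha b hb
    simp only [List.mem_singleton] at hb
    subst hb
    intro he
    exact h2 (he ▸ ha)

theorem recL_last : ∀ (v u : List Int) (x : Int), x ∉ v →
    ∃ w, recL (u ++ x :: v) = w ++ x :: recL v := by
  intro v
  induction v using List.reverseRecOn with
  | nil =>
    intro u x _
    refine ⟨(recL u).erase x, ?_⟩
    have : u ++ [x] = u ++ x :: ([] : List Int) := by simp
    rw [← this, recL_append]
    simp [recL]
  | append_singleton v' y ih =>
    intro u x hx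
    have hxv' : x ∉ v' := fun h => hx (by simp [h])
    have hxy : x ≠ y := fun h => hx (by simp [h])
    obtain ⟨w, hw⟩ := ih u x hxv'
    have hrw : recL (u ++ x :: (v' ++ [y])) = (recL (u ++ x :: v')).erase y ++ [y] := by
      have : u ++ x :: (v' ++ [y]) = (u ++ x :: v') ++ [y] := by simp
      rw [this, recL_append]
    have hnd : (w ++ x :: recL v').Nodup := hw ▸ nodup_recL (u ++ x :: v')
    by_cases hyv : y ∈ recL v'
    · -- y appears in the recL v' part; nodup ⇒ y ∉ w and y ≠ x
      have hyw : y ∉ w := by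
        intro hmem
        have := (List.nodup_append.1 hnd).2.2
        exact this y hmem y (by simp [hyv]) rfl
      have hyx : y ≠ x := fun h => hxy h.symm
      refine ⟨w, ?_⟩
      rw [hrw, hw, List.erase_append_right _ hyw, List.erase_cons_tail (by simp [hyx.symm] : ¬ (x == y) = true)]
      rw [recL_append]
      simp
    · -- y not in recL v'
      have herase : (w ++ x :: recL v').erase y = w.erase y ++ x :: recL v' := by
        by_cases hyw : y ∈ w
        · rw [List.erase_append_left _ hyw]
        · rw [List.erase_of_not_mem (by simp [hyw, hyv, hxy.symm] : y ∉ w ++ x :: recL v'),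
              List.erase_of_not_mem hyw]
      refine ⟨w.erase y, ?_⟩
      rw [hrw, hw, herase, recL_append, List.erase_of_not_mem hyv]
      simp

theorem keepL_subset {k : Int} {l : List Int} {x : Int} (h : x ∈ keepL k l) : x ∈ l := by
  unfold keepL at h
  split at h
  · exact List.mem_of_mem_drop h
  · exact h

theorem keepL_of_le {k : Int} (hk : 0 ≤ k) {l : List Int} (h : l.length ≤ k.toNat) :
    keepL k l = l := by
  unfold keepL
  rw [if_pos hk]
  have : l.length - k.toNat = 0 := by omega
  simp [this]

theorem keepL_append {k : Int} (hk : 0 ≤ k) {m s : List Int} (h : k.toNat ≤ s.length) :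
    keepL k (m ++ s) = keepL k s := by
  unfold keepL
  rw [if_pos hk, if_pos hk]
  have h1 : (m ++ s).length - k.toNat = m.length + (s.length - k.toNat) := by
    simp; omega
  rw [h1, List.drop_append]
  rw [List.drop_eq_nil_of_le (by omega)]
  simp only [List.nil_append]
  congr 1
  omega

theorem mem_keepL {k : Int} {w s : List Int} {x : Int} (hxw : x ∉ w) (hxs : x ∉ s) :
    x ∈ keepL k (w ++ x :: s) ↔ (¬ 0 ≤ k) ∨ s.length < k.toNat := by
  unfold keepL
  by_cases hk : 0 ≤ k
  · rw [if_pos hk]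
    simp only [hk, not_true_eq_false, false_or]
    set d := (w ++ x :: s).length - k.toNat with hd
    have hlen : (w ++ x :: s).length = w.length + s.length + 1 := by
      rw [List.length_append, List.length_cons]
      omega
    rw [hlen] at hd
    rw [List.drop_append]
    constructor
    · intro h
      rcases List.mem_append.1 h with h1 | h1
      · exact absurd (List.mem_of_mem_drop h1) hxw
      · by_cases hle : d ≤ w.length
        · omega
        · have he : d - w.length = (d - w.length - 1) + 1 := by omega
          rw [he, List.drop_succ_cons] at h1
          exact absurd (List.mem_of_mem_drop h1) hxs
    · intro h
      have h0 : d - w.length = 0 := by omega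
      rw [h0]
      simp
  · rw [if_neg hk]
    simp [hk]

theorem mem_keepL_of_lt {k : Int} {w s : List Int} {x : Int} (hxw : x ∉ w) (hxs : x ∉ s) :
    x ∈ keepL k (w ++ x :: s) ↔ ¬ (0 ≤ k ∧ k ≤ (s.length : Int)) := by
  rw [mem_keepL hxw hxs]
  by_cases hk : 0 ≤ k
  · simp only [hk, not_true_eq_false, false_or, true_and]
    omega
  · simp [hk]

-- length of the distinct-element list of v equals the length of recL v
theorem length_ofList_eq_recL (v : List Int) :
    (PySem.Set.ofList v).length = (recL v).length := by
  have hperm : (PySem.Set.ofList v).Perm (recL v) := by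
    rw [List.perm_ext_iff_of_nodup (PySem.Set.nodup_ofList v) (nodup_recL v)]
    intro a
    rw [PySem.Set.mem_ofList, mem_recL]
  exact hperm.length_eq

theorem contains_dictOf (l : List Int) (x : Int) : (dictOf l).contains x = true ↔ x ∈ l := by
  simp [dictOf, PySem.Dict.contains, List.any_map, Function.comp]

theorem erase_dictOf (l : List Int) (hl : l.Nodup) (x : Int) :
    (dictOf l).erase x = dictOf (l.erase x) := by
  unfold dictOf PySem.Dict.erase
  simp only [List.filter_map]
  rw [hl.erase_eq_filter]
  congr 2

theorem insert_dictOf (l : List Int) (x : Int) (hx : x ∉ l) :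
    (dictOf l).insert x true = dictOf (l ++ [x]) := by
  have hc : (dictOf l).contains x = false := by
    apply Bool.eq_false_iff.2
    intro h
    exact hx ((contains_dictOf l x).1 h)
  unfold PySem.Dict.insert
  rw [hc]
  simp [dictOf]

theorem size_dictOf (l : List Int) : (dictOf l).size = l.length := by
  simp [dictOf, PySem.Dict.size]

theorem drop_dictOf (l : List Int) :
    PySem.Dict.mk ((dictOf l).items.drop 1) = dictOf (l.drop 1) := by
  unfold dictOf
  congr 1
  exact (List.map_drop (f := fun y => (y, true)) (i := 1) (l := l)).symm

theorem nodup_keepL (k : Int) {l : List Int} (h : l.Nodup) : (keepL k l).Nodup := by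
  unfold keepL
  split
  · exact ((List.drop_sublist _ _).nodup) h
  · exact h

theorem keepL_hit {k : Int} {l : List Int} (hnd : l.Nodup) {x : Int} (hx : x ∈ keepL k l) :
    keepL k (l.erase x ++ [x]) = (keepL k l).erase x ++ [x] := by
  by_cases hk : 0 ≤ k
  · set d := l.length - k.toNat with hd
    have hxd : x ∈ l.drop d := by
      unfold keepL at hx; rwa [if_pos hk] at hx
    have hxt : x ∉ l.take d := by
      intro h
      have hsplit : (l.take d ++ l.drop d).Nodup := by rwa [List.take_append_drop]
      exact (List.nodup_append.1 hsplit).2.2 x h x hxd rfl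
    have herase : l.erase x = l.take d ++ (l.drop d).erase x := by
      conv_lhs => rw [← List.take_append_drop d l]
      rw [List.erase_append_right _ hxt]
    have hle : d ≤ l.length := by omega
    have hlen_d : (l.drop d).length = l.length - d := by simp
    have hxdlen : 1 ≤ (l.drop d).length := List.length_pos_of_mem hxd
    have hlen_e : ((l.drop d).erase x).length = (l.drop d).length - 1 :=
      List.length_erase_of_mem hxd
    unfold keepL
    rw [if_pos hk, if_pos hk, herase, List.append_assoc]
    have hlen1 : (l.take d ++ ((l.drop d).erase x ++ [x])).length - k.toNat = d := by
      rw [List.length_append, List.length_append, List.length_take, hlen_e]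
      simp only [List.length_cons, List.length_nil]
      omega
    have htake : (l.take d).length = d := by simp [hle]
    rw [hlen1, List.drop_append]
    rw [List.drop_eq_nil_of_le (by simp : (l.take d).length ≤ d)]
    rw [htake, Nat.sub_self]
    simp [hd]
  · unfold keepL
    rw [if_neg hk, if_neg hk]

theorem keepL_miss_full {k : Int} {l : List Int} {x : Int}
    (hx : x ∉ keepL k l) (hk : 0 ≤ k) (hk1 : k ≠ 0)
    (hsz : (keepL k l).length = k.toNat) :
    keepL k (l.erase x ++ [x]) = (keepL k l).drop 1 ++ [x] := by
  set d := l.length - k.toNat with hd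
  have hkeep : keepL k l = l.drop d := by unfold keepL; rw [if_pos hk]
  have hxs : x ∉ l.drop d := by rwa [hkeep] at hx
  have hlen : (l.drop d).length = k.toNat := by rw [← hkeep]; exact hsz
  have hk1' : 1 ≤ k.toNat := by omega
  have herase : l.erase x = (l.take d).erase x ++ l.drop d := by
    by_cases hxt : x ∈ l.take d
    · conv_lhs => rw [← List.take_append_drop d l]
      rw [List.erase_append_left _ hxt]
    · have hxl : x ∉ l := by
        intro h
        rw [← List.take_append_drop d l] at h
        rcases List.mem_append.1 h with h1 | h1
        · exact hxt h1
        · exact hxs h1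
      rw [List.erase_of_not_mem hxl, List.erase_of_not_mem hxt]
      exact (List.take_append_drop d l).symm
  rw [herase, hkeep, List.append_assoc]
  rw [keepL_append hk (by simp [List.length_append, hlen])]
  obtain ⟨a, t, hat⟩ : ∃ a t, l.drop d = a :: t := by
    cases h : l.drop d with
    | nil => rw [h] at hlen; simp at hlen; omega
    | cons a t => exact ⟨a, t, rfl⟩
  rw [hat]
  have hlent : t.length + 1 = k.toNat := by rw [hat] at hlen; simpa using hlen
  unfold keepL
  rw [if_pos hk]
  have hone : ((a :: t) ++ [x]).length - k.toNat = 1 := by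
    simp only [List.length_append, List.length_cons, List.length_nil]
    omega
  rw [hone]
  simp

theorem keepL_miss_room {k : Int} {l : List Int} {x : Int}
    (hx : x ∉ keepL k l) (hsz : (((keepL k l).length : Nat) : Int) ≠ k) :
    keepL k (l.erase x ++ [x]) = keepL k l ++ [x] := by
  by_cases hk : 0 ≤ k
  · have hkeep : keepL k l = l.drop (l.length - k.toNat) := by unfold keepL; rw [if_pos hk]
    have hlt : l.length < k.toNat := by
      by_contra hge
      rw [not_lt] at hge
      have hlen : (keepL k l).length = k.toNat := by rw [hkeep]; simp; omega
      exact hsz (by rw [hlen]; omega)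
    have hfull : keepL k l = l := keepL_of_le hk (by omega)
    have hxl : x ∉ l := by rwa [hfull] at hx
    rw [List.erase_of_not_mem hxl, hfull]
    exact keepL_of_le hk (by simp; omega)
  · have hfull : keepL k l = l := by unfold keepL; rw [if_neg hk]
    have hxl : x ∉ l := by rwa [hfull] at hx
    rw [List.erase_of_not_mem hxl, hfull]
    unfold keepL
    rw [if_neg hk]

-- the B-side fold body, evaluated on its own full window, is the miss indicator
theorem bStep_eval (k : Int) (p : List Int) (x : Int) (m : Int) :
    bStep k p m ((p.length : Int), x) = m + missB k p x := by
  have hw : PySem.List.slice p none (some ((p.length : Nat) : Int)) = p := by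
    rw [PySem.List.slice_to_natCast]
    exact List.take_length
  unfold bStep missB
  simp only [hw]
  by_cases hx : x ∈ p
  · rw [if_neg (by simp [hx])]
    have hxr : x ∈ p.reverse := List.mem_reverse.2 hx
    have hsome : (PySem.List.index? p.reverse x).isSome := by
      rw [PySem.List.index?_isSome_iff]
      exact hxr
    obtain ⟨n, hn⟩ := Option.isSome_iff_exists.1 hsome
    obtain ⟨pre, suf, hps, hlenpre, hxpre⟩ := (PySem.List.index?_eq_some_iff _ _ _).1 hn
    have hp : p = suf.reverse ++ x :: pre.reverse := by
      have h2 := congrArg List.reverse hps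
      simpa using h2
    have hxv : x ∉ pre.reverse := fun h => hxpre (List.mem_reverse.1 h)
    have hvlen : pre.reverse.length = n := by simpa using hlenpre
    simp only [PySem.List.slice?_none_none_neg_one, Option.getD_some, hn]
    have hplen : p.length = suf.reverse.length + pre.reverse.length + 1 := by
      rw [hp]; simp; omega
    have hj : ((p.length : Int) - 1 - (n : Int)) + 1 = ((suf.reverse.length + 1 : Nat) : Int) := by
      push_cast
      omega
    simp only [hj, PySem.List.slice_from_natCast]
    have hdrop : p.drop (suf.reverse.length + 1) = pre.reverse := by
      rw [hp, List.drop_append, List.drop_eq_nil_of_le (by omega)]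
      have h1 : suf.reverse.length + 1 - suf.reverse.length = 1 := by omega
      rw [h1]
      simp
    simp only [hdrop, length_ofList_eq_recL]
    obtain ⟨w, hwrec⟩ := recL_last pre.reverse suf.reverse x hxv
    have hrp : recL p = w ++ x :: recL pre.reverse := by rw [hp]; exact hwrec
    have hndp : (w ++ x :: recL pre.reverse).Nodup := hrp ▸ nodup_recL p
    have hxw : x ∉ w := fun h =>
      (List.nodup_append.1 hndp).2.2 x h x (by simp) rfl
    have hxrv : x ∉ recL pre.reverse := by
      have := (List.nodup_append.1 hndp).2.1
      intro h
      rw [List.nodup_cons] at this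
      exact this.1 h
    have hmem := mem_keepL_of_lt (k := k) hxw hxrv
    simp only [hrp]
    by_cases hcond : 0 ≤ k ∧ k ≤ ((recL pre.reverse).length : Int)
    · rw [if_pos hcond, if_neg (by rw [hmem]; exact fun h => h hcond)]
    · rw [if_neg hcond, if_pos (hmem.2 hcond)]
      simp
  · rw [if_pos (by simp [hx])]
    have hnk : x ∉ keepL k (recL p) := fun h => hx ((mem_recL p x).1 (keepL_subset h))
    rw [if_neg hnk]

theorem aStep_eval (k : Int) (hk : k ≠ 0) (p : List Int) (x : Int) (m : Int) :
    aStep k (dictOf (keepL k (recL p)), m) x = (dictOf (keepL k (recL (p ++ [x]))), m + missB k p x) := by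
  have hnd : (recL p).Nodup := nodup_recL p
  have hndk : (keepL k (recL p)).Nodup := nodup_keepL k hnd
  rw [recL_append]
  unfold aStep missB
  by_cases hx : x ∈ keepL k (recL p)
  · rw [if_pos ((contains_dictOf _ _).2 hx)]
    rw [erase_dictOf _ hndk, insert_dictOf _ _ (fun h => ((hndk.mem_erase_iff).1 h).1 rfl)]
    rw [keepL_hit hnd hx]
    simp [hx]
  · rw [if_neg (fun h => hx ((contains_dictOf _ _).1 h))]
    rw [if_neg hx]
    by_cases hsz : (((keepL k (recL p)).length : Nat) : Int) = k
    · have hbeq : (((dictOf (keepL k (recL p))).size : Int) == k) = true := by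
        rw [size_dictOf]; exact beq_iff_eq.2 hsz
      rw [if_pos hbeq, drop_dictOf]
      have hk0 : 0 ≤ k := by rw [← hsz]; positivity
      have hxd : x ∉ (keepL k (recL p)).drop 1 := fun h => hx (List.mem_of_mem_drop h)
      rw [insert_dictOf _ _ hxd]
      rw [keepL_miss_full hx hk0 hk (by omega)]
    · have hbeq : (((dictOf (keepL k (recL p))).size : Int) == k) = false := by
        rw [size_dictOf]
        exact beq_eq_false_iff_ne.2 hsz
      rw [if_neg (by rw [hbeq]; exact Bool.false_ne_true)]
      rw [insert_dictOf _ _ hx]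
      rw [keepL_miss_room hx hsz]

theorem bStep_congr (k : Int) (q p : List Int) (i : Int) (x : Int) (m : Int)
    (h : PySem.List.slice q none (some i) = PySem.List.slice p none (some i)) :
    bStep k q m (i, x) = bStep k p m (i, x) := by
  unfold bStep
  rw [h]

theorem alt_append (k : Int) (p : List Int) (x : Int) :
    count_misses_lru_alt k (p ++ [x]) = count_misses_lru_alt k p + missB k p x := by
  rw [alt_eq_fold, alt_eq_fold]
  rw [PySem.List.enumerate_append, List.foldl_append]
  have hcong : (PySem.List.enumerate p 0).foldl (bStep k (p ++ [x])) 0 =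
      (PySem.List.enumerate p 0).foldl (bStep k p) 0 := by
    apply PySem.List.foldl_congr_mem
    intro acc q hq
    rw [PySem.List.mem_enumerate_iff] at hq
    obtain ⟨jn, hjn, rfl⟩ := hq
    have h0 : ((0 : Int) + (jn : Int)) = ((jn : Nat) : Int) := by omega
    apply bStep_congr
    rw [h0, PySem.List.slice_to_natCast, PySem.List.slice_to_natCast,
      List.take_append_of_le_length (le_of_lt hjn)]
  rw [hcong]
  have henum : PySem.List.enumerate [x] (0 + (p.length : Int)) = [((p.length : Int), x)] := by
    rw [PySem.List.enumerate_cons, PySem.List.enumerate_nil]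
    norm_num
  rw [henum, List.foldl_cons, List.foldl_nil]
  rw [bStep_congr k (p ++ [x]) p _ x _ (by
    rw [show ((p.length : Int)) = ((p.length : Nat) : Int) from rfl,
      PySem.List.slice_to_natCast, PySem.List.slice_to_natCast,
      List.take_append_of_le_length (le_refl _)])]
  rw [bStep_eval]

theorem A_inv (k : Int) (hk : k ≠ 0) (p : List Int) :
    p.foldl (aStep k) (PySem.Dict.empty, 0) = (dictOf (keepL k (recL p)), count_misses_lru_alt k p) := by
  induction p using List.reverseRecOn with
  | nil =>
    simp [recL, keepL, dictOf, count_misses_lru_alt, PySem.Dict.empty, PySem.List.enumerate]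
  | append_singleton p y ih =>
    rw [List.foldl_append, ih]
    simp only [List.foldl_cons, List.foldl_nil]
    rw [aStep_eval k hk p y, alt_append]

-- ===== VERDICT (by name: the statement is the Claim_ definition above) =====
theorem count_misses_lru_spec : Claim_equal_count_misses_lru := by
  intro k requests _ hpre
  unfold Spec_count_misses_lru
  rcases hpre with hk | hnil
  · rw [count_eq_fold, A_inv k hk requests]
  · subst hnil; rfl

theorem count_misses_lru_raises : Claim_raises_count_misses_lru := by
  unfold Claim_raises_count_misses_lru
  constructor
  · intro k requests _ hr hpre
    rcases hpre with hk | hnil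
    · exact hk hr.1
    · exact hr.2 hnil
  · exact ⟨by decide, by decide, by decide⟩

-- witness self-check: the raise witness really lies in the raises region
theorem pvRaiseWitness_count_misses_lru_ok :
    Raises_count_misses_lru pvRaiseWitness_count_misses_lru.1 pvRaiseWitness_count_misses_lru.2 :=
  count_misses_lru_raises.2.2.1
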